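-- pv_equiv track=rewrite | github.com/Dev-Ian-Lee/algorithm | programmers/level2/pair_replace.py | solution
-- ===== SOURCE A (Python) =====
-- def solution(s):
--     stack = []
--
--     for c in s:
--         # 스택이 비어있을 경우 현재 문자 삽입
--         if len(stack) == 0:
--             stack.append(c)
--
--         else:
--             # 이전 문자와 현재 문자가 다를 경우, 현재 문자 스택에 삽입
--             if stack[-1] != c:
--                 stack.append(c)
--
--             # 같을 경우, 이전 문자 스택에서 추출
--             else:
--                 stack.pop()
--
--     # 스택의 길이가 0인 경우는, 모든 문자가 짝지어 제거된 것이므로 1 반환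
--     if len(stack) == 0:
--         return 1
--
--     else:
--         return 0
-- ===== SOURCE B (Python) =====
-- def solution(s):
--     t = s
--     while True:
--         found = -1
--         i = 0
--         while i + 1 < len(t):
--             if t[i] == t[i + 1]:
--                 found = i
--                 break
--             i += 1
--         if found < 0:
--             break
--         t = t[:found] + t[found + 2:]
--     return 1 if t == "" else 0
-- ===== Notes on version B (the rewrite author's own statement) =====
-- stated objective: alternative
-- what changed: Replaces the single-pass stack with repeated scanning of the current string to a fixed point: find the first adjacent equal pair, splice both characters out, restart; return 1 iff the string stabilizes to empty (equal by confluence of pair removal).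
import Mathlib
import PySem

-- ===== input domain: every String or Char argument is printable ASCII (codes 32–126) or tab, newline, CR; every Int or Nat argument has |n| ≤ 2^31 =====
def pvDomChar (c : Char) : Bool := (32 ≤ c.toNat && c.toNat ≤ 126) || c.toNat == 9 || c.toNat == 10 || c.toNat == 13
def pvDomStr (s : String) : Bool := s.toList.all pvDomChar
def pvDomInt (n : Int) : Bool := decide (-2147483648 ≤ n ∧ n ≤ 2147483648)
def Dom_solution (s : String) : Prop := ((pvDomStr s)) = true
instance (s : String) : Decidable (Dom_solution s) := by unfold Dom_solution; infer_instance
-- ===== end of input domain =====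

-- B replaces A's one-pass stack by repeated scan-and-splice of the current string to a
-- fixed point (an alternative, not faster, decomposition); equal by confluence of pair removal.

-- ===== PORT A =====
-- stack is a List Char with its top at the HEAD (append → cons, stack[-1] → head, pop → tail)
def solStep (stack : List Char) (c : Char) : List Char :=
  match stack with
  | [] => [c]                                   -- empty stack: push current char
  | top :: rest => if top ≠ c then c :: stack   -- previous char differs: push
                   else rest                    -- equal: pop

def solution (s : String) : Int :=
  let stack := s.toList.foldl solStep []
  if stack = [] then 1 else 0

-- ===== PORT B =====
-- inner scan of Source B: find the first adjacent equal pair and splice it out (none = not found)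
def splice1 : List Char → Option (List Char)
  | [] => none
  | [_] => none
  | a :: b :: t => if a = b then some t else (splice1 (b :: t)).map (a :: ·)

theorem splice1_length : ∀ {l t : List Char}, splice1 l = some t → t.length < l.length := by
  intro l
  induction l with
  | nil => intro t h; simp [splice1] at h
  | cons a l ih =>
    intro t h
    match l with
    | [] => simp [splice1] at h
    | b :: r =>
      by_cases hab : a = b
      · simp [splice1, hab] at h; subst h; simp
      · simp [splice1, hab] at h
        obtain ⟨t', ht', rfl⟩ := h
        have := ih ht'
        simp at this ⊢; omega

-- outer loop of Source B: splice until no adjacent equal pair remains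
def reduceFix (l : List Char) : List Char :=
  match h : splice1 l with
  | none => l
  | some t => reduceFix t
termination_by l.length
decreasing_by exact splice1_length h

def solution_alt (s : String) : Int :=
  if reduceFix s.toList = [] then 1 else 0

-- ===== PRECONDITION & SPEC =====
def Spec_solution (s : String) (out : Int) : Prop := out = solution_alt s
instance (s : String) (out : Int) : Decidable (Spec_solution s out) := by unfold Spec_solution; infer_instance

-- ===== CLAIM (what is proved, stated in full; the proofs are below) =====
def Claim_equal_solution : Prop := ∀ (s : String), Dom_solution s → Spec_solution s (solution s)

-- ===== LEMMAS AND PROOFS =====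

-- the stack never holds two equal adjacent characters
theorem solStep_chain {st : List Char} (h : st.IsChain (· ≠ ·)) (c : Char) :
    (solStep st c).IsChain (· ≠ ·) := by
  match st with
  | [] => simp [solStep]
  | t :: r =>
    by_cases htc : t = c
    · simp [solStep, htc]; exact h.tail
    · simpa [solStep, htc] using ⟨Ne.symm htc, h⟩

-- feeding a pair of equal characters to an adjacent-distinct stack is the identity
theorem step_pair {st : List Char} (h : st.IsChain (· ≠ ·)) (a : Char) :
    solStep (solStep st a) a = st := by
  match st with
  | [] => simp [solStep]
  | t :: r =>
    by_cases hta : t = a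
    · subst hta
      match r with
      | [] => simp [solStep]
      | b :: r' =>
        have htb : t ≠ b := by simpa using (List.isChain_cons.mp h).1
        simp [solStep, Ne.symm htb]
    · simp [solStep, hta]

-- one splice step does not change the stack the fold computes
theorem splice1_foldl : ∀ {l t : List Char}, splice1 l = some t →
    ∀ {st : List Char}, st.IsChain (· ≠ ·) → l.foldl solStep st = t.foldl solStep st := by
  intro l
  induction l with
  | nil => intro t h; simp [splice1] at h
  | cons a l ih =>
    intro t h st hst
    match l with
    | [] => simp [splice1] at h
    | b :: r =>
      by_cases hab : a = b
      · subst hab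
        simp [splice1] at h; subst h
        simp [List.foldl, step_pair hst]
      · simp [splice1, hab] at h
        obtain ⟨t', ht', rfl⟩ := h
        simp only [List.foldl]
        exact ih ht' (solStep_chain hst a)

-- the whole fixed-point reduction does not change the stack
theorem reduceFix_foldl (l : List Char) :
    ∀ {st : List Char}, st.IsChain (· ≠ ·) → l.foldl solStep st = (reduceFix l).foldl solStep st := by
  induction l using reduceFix.induct with
  | case1 l h => intro st _; rw [reduceFix, h]
  | case2 l t h ih =>
    intro st hst
    rw [reduceFix, h, splice1_foldl h hst]
    exact ih hst

-- a string with no adjacent equal pair is adjacent-distinct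
theorem splice1_none_chain : ∀ {l : List Char}, splice1 l = none → l.IsChain (· ≠ ·) := by
  intro l
  induction l with
  | nil => intro _; simp
  | cons a l ih =>
    intro h
    match l with
    | [] => simp
    | b :: r =>
      by_cases hab : a = b
      · simp [splice1, hab] at h
      · simp [splice1, hab] at h
        exact List.isChain_cons.mpr ⟨by simpa using hab, ih h⟩

theorem reduceFix_none (l : List Char) : splice1 (reduceFix l) = none := by
  induction l using reduceFix.induct with
  | case1 l h => rw [reduceFix, h]; exact h
  | case2 l t h ih => rw [reduceFix, h]; exact ih

-- on an adjacent-distinct input the fold only pushes: it returns the reversed input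
theorem foldl_chain_rev : ∀ (l st : List Char), (st.reverse ++ l).IsChain (· ≠ ·) →
    l.foldl solStep st = l.reverse ++ st := by
  intro l
  induction l with
  | nil => intro st _; simp
  | cons c l ih =>
    intro st h
    have hstep : solStep st c = c :: st := by
      match st with
      | [] => simp [solStep]
      | t :: r =>
        have : t ≠ c := by
          have := (List.isChain_append.mp h).2.2
          simpa using this t (by simp)
        simp [solStep, this]
    rw [List.foldl, hstep, ih (c :: st) (by simpa using h)]
    simp

-- ===== VERDICT (by name: the statement is the Claim_ definition above) =====
theorem solution_spec : Claim_equal_solution := by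
  intro s _
  unfold Spec_solution solution solution_alt
  have h1 : s.toList.foldl solStep [] = (reduceFix s.toList).foldl solStep [] :=
    reduceFix_foldl s.toList (by simp)
  have h2 : (reduceFix s.toList).foldl solStep [] = (reduceFix s.toList).reverse := by
    have := foldl_chain_rev (reduceFix s.toList) []
      (by simpa using splice1_none_chain (reduceFix_none s.toList))
    simpa using this
  simp only [h1, h2]
  by_cases he : reduceFix s.toList = []
  · simp [he]
  · simp [he, List.reverse_eq_nil_iff]
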